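-- pv_equiv track=rewrite | github.com/msolo/mavis-corrector | mavis/corrector/text.py | is_numeric_with_punctuation
-- ===== SOURCE A (Python) =====
-- _punct = r"""/\|,./<>?;:!@#$%^&*()-_=+'"¡¿…`‘“”’[]{}"""
--
-- def is_punctuation(c):
--     return c in _punct
--
-- def is_numeric_with_punctuation(text):
--     has_num = False
--     has_punc = False
--     for c in text:
--         if c.isnumeric():
--             has_num = True
--         elif is_punctuation(c):
--             has_punc = True
--         else:
--             return False
--     return has_num
-- ===== SOURCE B (Python) =====
-- _punct = r"""/\|,./<>?;:!@#$%^&*()-_=+'"¡¿…`‘“”’[]{}"""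
--
-- _punct_set = set(_punct)
--
-- def is_numeric_with_punctuation(text):
--     nums = {c for c in text if c.isnumeric()}
--     others = set(text) - nums - _punct_set
--     return bool(nums) and not others
-- ===== Notes on version B (the rewrite author's own statement) =====
-- stated objective: alternative
-- what changed: Replaces A's flag-tracking character loop with set algebra over distinct characters: build the set of numeric characters, subtract it and the punctuation set from set(text), and answer from emptiness of those sets.
import Mathlib
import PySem

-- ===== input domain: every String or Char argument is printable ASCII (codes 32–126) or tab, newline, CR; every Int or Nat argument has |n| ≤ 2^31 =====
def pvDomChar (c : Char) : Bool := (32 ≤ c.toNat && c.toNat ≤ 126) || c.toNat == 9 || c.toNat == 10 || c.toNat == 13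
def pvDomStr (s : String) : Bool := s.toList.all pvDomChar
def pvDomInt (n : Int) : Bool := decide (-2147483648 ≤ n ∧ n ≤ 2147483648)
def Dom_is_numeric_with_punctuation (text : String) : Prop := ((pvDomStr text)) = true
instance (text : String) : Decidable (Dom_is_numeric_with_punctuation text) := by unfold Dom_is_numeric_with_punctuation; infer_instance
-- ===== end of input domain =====

-- ===== PORT A =====
-- B replaces A's flag-tracking loop by set algebra over the distinct characters; objective: alternative.
def pvPunct : String := "/\\|,./<>?;:!@#$%^&*()-_=+'\"\u00a1\u00bf\u2026`\u2018\u201c\u201d\u2019[]{}"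

def is_punctuation (c : Char) : Bool := pvPunct.toList.contains c

-- the for-loop of A, carrying the has_num / has_punc flags; Char.isDigit is exact for isnumeric on the printable-ASCII domain
def pvLoopA : List Char → Bool → Bool → Bool
  | [], has_num, _ => has_num
  | c :: rest, has_num, has_punc =>
    if c.isDigit then pvLoopA rest true has_punc
    else if is_punctuation c then pvLoopA rest has_num true
    else false

def is_numeric_with_punctuation (text : String) : Bool :=
  pvLoopA text.toList false false

-- ===== PORT B =====
def pvPunctSet : PySem.Set Char := PySem.Set.ofList pvPunct.toList

def is_numeric_with_punctuation_alt (text : String) : Bool :=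
  let nums : PySem.Set Char := PySem.Set.ofList (text.toList.filter (fun c => c.isDigit))
  let others : PySem.Set Char :=
    PySem.Set.diff (PySem.Set.diff (PySem.Set.ofList text.toList) nums) pvPunctSet
  !(decide (nums = [])) && decide (others = [])

-- ===== PRECONDITION & SPEC =====
def Spec_is_numeric_with_punctuation (text : String) (out : Bool) : Prop := out = is_numeric_with_punctuation_alt text
instance (text : String) (out : Bool) : Decidable (Spec_is_numeric_with_punctuation text out) := by unfold Spec_is_numeric_with_punctuation; infer_instance

-- ===== CLAIM (what is proved, stated in full; the proofs are below) =====
def Claim_equal_is_numeric_with_punctuation : Prop := ∀ (text : String), Dom_is_numeric_with_punctuation text → Spec_is_numeric_with_punctuation text (is_numeric_with_punctuation text)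

-- ===== LEMMAS AND PROOFS =====
theorem pvLoopA_eq (l : List Char) (hn hp : Bool) :
    pvLoopA l hn hp = ((l.all (fun c => c.isDigit || is_punctuation c)) && (hn || l.any (fun c => c.isDigit))) := by
  induction l generalizing hn hp with
  | nil => simp [pvLoopA]
  | cons c rest ih =>
    by_cases hd : c.isDigit
    · simp [pvLoopA, hd, ih]
    · by_cases hpc : is_punctuation c
      · simp [pvLoopA, hd, hpc, ih]
      · simp [pvLoopA, hd, hpc]

theorem pvNums_nil_iff (l : List Char) :
    (PySem.Set.ofList (l.filter (fun c => c.isDigit)) = []) ↔ (l.any (fun c => c.isDigit) = false) := by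
  rw [List.eq_nil_iff_forall_not_mem, List.any_eq_false]
  simp [PySem.Set.mem_ofList, List.mem_filter]

theorem pvOthers_nil_iff (l : List Char) :
    (PySem.Set.diff (PySem.Set.diff (PySem.Set.ofList l) (PySem.Set.ofList (l.filter (fun c => c.isDigit)))) pvPunctSet = []) ↔
    (l.all (fun c => c.isDigit || is_punctuation c) = true) := by
  rw [List.eq_nil_iff_forall_not_mem, List.all_eq_true]
  constructor
  · intro h c hc
    have := h c
    simp [PySem.Set.mem_diff, PySem.Set.mem_ofList, List.mem_filter, pvPunctSet, is_punctuation, hc] at this ⊢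
    cases hd : c.isDigit
    · exact Or.inr (this hd)
    · exact Or.inl rfl
  · intro h c
    simp [PySem.Set.mem_diff, PySem.Set.mem_ofList, List.mem_filter, pvPunctSet]
    intro hc hnd
    have := h c hc
    simp [is_punctuation] at this
    rcases this with h' | h'
    · simp [hnd hc] at h'
    · exact h'

-- ===== VERDICT (by name: the statement is the Claim_ definition above) =====
theorem is_numeric_with_punctuation_spec : Claim_equal_is_numeric_with_punctuation := by
  intro text _
  unfold Spec_is_numeric_with_punctuation is_numeric_with_punctuation is_numeric_with_punctuation_alt
  rw [pvLoopA_eq]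
  simp only [Bool.false_or]
  by_cases h1 : text.toList.all (fun c => c.isDigit || is_punctuation c) = true
  · by_cases h2 : text.toList.any (fun c => c.isDigit) = true
    · have hn : ¬ (PySem.Set.ofList (text.toList.filter (fun c => c.isDigit)) = []) := by
        rw [pvNums_nil_iff]; simp [h2]
      have ho := (pvOthers_nil_iff text.toList).mpr h1
      simp [h1, h2, hn, ho]
    · have hn : PySem.Set.ofList (text.toList.filter (fun c => c.isDigit)) = [] := by
        rw [pvNums_nil_iff]; simpa using h2
      simp [hn, h2]
  · have ho : ¬ (PySem.Set.diff (PySem.Set.diff (PySem.Set.ofList text.toList) (PySem.Set.ofList (text.toList.filter (fun c => c.isDigit)))) pvPunctSet = []) := by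
      rw [pvOthers_nil_iff]; exact h1
    simp [h1, ho]
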